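-- pv_equiv track=rewrite | github.com/bryan-ojay/csca48 | Exercises/ex10/ex10.py | _radix_helper
-- ===== SOURCE A (Python) =====
-- def _radix_helper(listA, place):
--     '''(list of int, int) -> list of int
--     Takes in a list of integers and the place value to sort it at. Returns
--     the sorted version of the list of integers.
--     REQ: all int in listA >= 0
--     REQ: place >= 1
--     REQ: place % 10 == 0 for all place > 1
--     >>> _radix_helper([2198, 23, 234, 0], 1)
--     [0, 23, 234, 2198]
--     '''
--     # Create list containing 10 slots
--     # Create new list to insert items from listA
--     # Assign variable for number of integers higher than the next place value
--     slot_list = ([], [], [], [], [], [], [], [], [], [])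
--     sort_list = []
--     next_place = 0
--
--     # Loop through the list
--     i = 0
--     while i < len(listA):
--
--         # Check if the number is bigger than the next place value
--         if listA[i] >= (place * 10):
--             next_place += 1
--
--         # Move the integer into the corresponding slot
--         slot_num = (listA[i] // place) % 10
--         slot_list[slot_num].append(listA[i])
--
--         i += 1
--
--     # Loop through the slot list after all of the elements have been removed
--     for slot in slot_list:
--         while len(slot) > 0:
--             # Move the integers from each slot back into the lsit
--             sort_list.append(slot.pop(0))
--
--     # Base Case, all the numbers are less than the next place value
--     if next_place == 0:
--         sorted_list = sort_list
--
--     # Recursive Case, there are still numbers higher than the next highest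
--     # place value
--     else:
--         sorted_list = _radix_helper(sort_list, place * 10)
--
--     return sorted_list
-- ===== SOURCE B (Python) =====
-- def _radix_helper(listA, place):
--     # Iterative LSD radix sort: each round builds the next ordering as the
--     # concatenation, digit 0..9, of the elements with that digit at `place`
--     # (10 filter passes, no bucket mutation), then either returns or advances.
--     while True:
--         sort_list = []
--         for d in range(10):
--             sort_list.extend(x for x in listA if (x // place) % 10 == d)
--         if all(x < place * 10 for x in listA):
--             return sort_list
--         listA = sort_list
--         place *= 10
-- ===== Notes on version B (the rewrite author's own statement) =====
-- stated objective: faster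
-- what changed: The recursive bucket distribution (mutating 10 slot lists and draining them with pop(0)) is replaced by an iterative while-loop whose round concatenates ten order-preserving filter passes, one per digit.
-- outside the precondition, e.g. on _radix_helper([-100], -1): A returns [-100], B returns [-100]
import Mathlib
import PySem

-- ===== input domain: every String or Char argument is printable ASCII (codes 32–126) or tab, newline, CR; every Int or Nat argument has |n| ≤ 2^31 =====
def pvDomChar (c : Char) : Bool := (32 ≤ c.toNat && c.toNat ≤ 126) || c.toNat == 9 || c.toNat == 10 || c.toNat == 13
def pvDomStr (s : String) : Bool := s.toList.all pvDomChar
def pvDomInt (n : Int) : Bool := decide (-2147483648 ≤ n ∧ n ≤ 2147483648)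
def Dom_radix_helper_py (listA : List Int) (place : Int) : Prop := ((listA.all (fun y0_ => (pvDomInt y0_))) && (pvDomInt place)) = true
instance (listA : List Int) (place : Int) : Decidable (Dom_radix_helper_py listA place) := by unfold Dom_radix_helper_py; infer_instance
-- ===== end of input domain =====

-- B replaces A's recursive bucket distribution (mutating 10 slots, then draining them)
-- by an iterative loop whose round is ten order-preserving filter passes; objective: faster (a timing run measured B faster at the largest size; no pop(0) shifting).

-- digit of x at `place`: (x // place) % 10, exactly as both Pythons write it
def pvDigit (x place : Int) : Int := PySem.Int.mod (PySem.Int.floordiv x place) 10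

-- ===== PORT A =====
-- one pass of A's while-loop: count of elements ≥ place*10, and the 10 slots
-- (Python's tuple indexing wraps a negative index: slot_list[n] with -10 ≤ n < 0 is slot n+10;
--  inside Pre_ the index is never negative)
def pvDistribA (listA : List Int) (place : Int) : Int × List (List Int) :=
  listA.foldl
    (fun st x =>
      let np := if x ≥ place * 10 then st.1 + 1 else st.1
      let n := pvDigit x place
      let idx := if n < 0 then n + 10 else n
      (np, st.2.modify idx.toNat (fun s => s ++ [x])))
    (0, [[], [], [], [], [], [], [], [], [], []])

-- A's second loop: drain each slot front-to-back (pop(0) appended in order = append the slot)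
def pvGatherA (slots : List (List Int)) : List Int :=
  slots.foldl (fun acc slot => acc ++ slot) []

-- A's recursion, with a fuel guard making it total; fuel 64 is never exhausted on
-- Dom ∧ Pre_ inputs (|x| ≤ 2^31 < 10^10 and place ≥ 1 give at most 11 rounds)
def pvRadixA (fuel : Nat) (listA : List Int) (place : Int) : List Int :=
  match fuel with
  | 0 => []
  | fuel + 1 =>
    let st := pvDistribA listA place
    let sort_list := pvGatherA st.2
    if st.1 = 0 then sort_list else pvRadixA fuel sort_list (place * 10)

def radix_helper_py (listA : List Int) (place : Int) : List Int :=
  pvRadixA 64 listA place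

-- ===== PORT B =====
-- one round of B: for d in range(10), extend with the elements whose digit is d
def pvRoundB (listA : List Int) (place : Int) : List Int :=
  (PySem.List.pyRange 0 10 1).foldl
    (fun acc d => acc ++ listA.filter (fun x => pvDigit x place == d)) []

-- B's while-True loop, with the same fuel guard (never exhausted on Dom ∧ Pre_ inputs)
def pvLoopB (fuel : Nat) (listA : List Int) (place : Int) : List Int :=
  match fuel with
  | 0 => []
  | fuel + 1 =>
    let sort_list := pvRoundB listA place
    if listA.all (fun x => decide (x < place * 10)) then sort_list
    else pvLoopB fuel sort_list (place * 10)

def radix_helper_py_alt (listA : List Int) (place : Int) : List Int :=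
  pvLoopB 64 listA place

-- ===== PRECONDITION & SPEC =====
-- Pre_ keeps the function's documented domain place ≥ 1 (plus the empty list, where A returns []
-- for every place): for place = 0 with a non-empty list A raises ZeroDivisionError, and for
-- negative place A usually exceeds the recursion limit (it returns, via floor arithmetic outside
-- its stated REQ place ≥ 1, only when every element is below 10*place).
def Pre_radix_helper_py (listA : List Int) (place : Int) : Prop := 1 ≤ place ∨ listA = []
instance (listA : List Int) (place : Int) : Decidable (Pre_radix_helper_py listA place) := by unfold Pre_radix_helper_py; infer_instance
def pvWitness_radix_helper_py : List Int × Int := ([2198, 23, 234, 0], 1)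
def Spec_radix_helper_py (listA : List Int) (place : Int) (out : List Int) : Prop := out = radix_helper_py_alt listA place
instance (listA : List Int) (place : Int) (out : List Int) : Decidable (Spec_radix_helper_py listA place out) := by unfold Spec_radix_helper_py; infer_instance

-- ===== CLAIM (what is proved, stated in full; the proofs are below) =====
def Claim_equal_radix_helper_py : Prop := ∀ (listA : List Int) (place : Int), Dom_radix_helper_py listA place → Pre_radix_helper_py listA place → Spec_radix_helper_py listA place (radix_helper_py listA place)

-- ===== LEMMAS AND PROOFS =====

-- the digit lies in [0,10) for every place (the modulus is the positive literal 10)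
theorem pvDigit_bounds (x place : Int) :
    0 ≤ pvDigit x place ∧ pvDigit x place < 10 := by
  exact ⟨PySem.Int.mod_nonneg _ (by norm_num), PySem.Int.mod_lt _ (by norm_num)⟩

-- the count component of A's distribution pass
theorem pvDistribA_fst (listA : List Int) (place : Int) :
    ∀ (np : Int) (s : List (List Int)),
      (listA.foldl
        (fun st x =>
          let np := if x ≥ place * 10 then st.1 + 1 else st.1
          let n := pvDigit x place
          let idx := if n < 0 then n + 10 else n
          (np, st.2.modify idx.toNat (fun s => s ++ [x]))) (np, s)).1
      = np + (listA.countP (fun x => decide (place * 10 ≤ x)) : Int) := by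
  induction listA with
  | nil => intro np s; simp
  | cons x l ih =>
    intro np s
    simp only [List.foldl_cons, List.countP_cons, ih]
    by_cases h : place * 10 ≤ x
    · simp [h, ge_iff_le]; ring
    · simp [h, ge_iff_le]

-- the slots component of A's distribution pass, componentwise
theorem pvDistribA_snd (place : Int) (listA : List Int) :
    ∀ (np : Int) (s : List (List Int)), s.length = 10 →
      (listA.foldl
        (fun st x =>
          let np := if x ≥ place * 10 then st.1 + 1 else st.1
          let n := pvDigit x place
          let idx := if n < 0 then n + 10 else n
          (np, st.2.modify idx.toNat (fun s => s ++ [x]))) (np, s)).2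
      = (List.range 10).map
          (fun d => s.getD d [] ++ listA.filter (fun x => (pvDigit x place).toNat = d)) := by
  induction listA with
  | nil =>
    intro np s hs
    apply List.ext_getElem <;> simp [hs]
    intro i hi
    simp [List.getElem?_eq_getElem (by omega : i < s.length)]
  | cons x l ih =>
    intro np s hs
    obtain ⟨h0, h1⟩ := pvDigit_bounds x place
    simp only [List.foldl_cons]
    rw [ih _ _ (by simp [hs])]
    apply List.ext_getElem <;> simp
    intro i hi
    have hix : (if pvDigit x place < 0 then pvDigit x place + 10 else pvDigit x place)
        = pvDigit x place := by omega
    rw [hix]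
    have hlt : (pvDigit x place).toNat < s.length := by omega
    by_cases hd : i = (pvDigit x place).toNat
    · subst hd
      simp [List.getElem?_eq_getElem hlt]
    · simp [Ne.symm hd]

-- one round of A equals one round of B (for every place: the digit is always in [0,10))
theorem pvRound_eq (listA : List Int) (place : Int) :
    pvGatherA (pvDistribA listA place).2 = pvRoundB listA place := by
  unfold pvDistribA pvGatherA pvRoundB
  rw [pvDistribA_snd place listA 0 _ rfl]
  rw [PySem.List.foldl_append_eq_flatten, PySem.List.foldl_append_eq_flatMap]
  rw [show PySem.List.pyRange 0 10 1 = (List.range 10).map (fun k : Nat => (k : Int)) by decide]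
  rw [List.flatMap_map]
  simp only [List.nil_append, ← List.flatMap_def, List.getD]
  apply List.flatMap_congr
  intro d hd
  rw [List.mem_range] at hd
  have hfil : listA.filter (fun x => decide ((pvDigit x place).toNat = d))
      = listA.filter (fun x => pvDigit x place == (d : Int)) := by
    apply List.filter_congr
    intro x _
    obtain ⟨h0, h1⟩ := pvDigit_bounds x place
    have hiff : ((pvDigit x place).toNat = d) ↔ (pvDigit x place = (d : Int)) := by omega
    simp only [hiff]
    exact Eq.symm (Bool.beq_eq_decide_eq _ _)
  interval_cases d <;> simpa using hfil

-- the stop conditions agree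
theorem stop_eq (listA : List Int) (place : Int) :
    ((pvDistribA listA place).1 = 0)
      ↔ (listA.all (fun x => decide (x < place * 10)) = true) := by
  unfold pvDistribA
  rw [pvDistribA_fst listA place 0 _]
  simp only [zero_add, List.all_eq_true]
  constructor
  · intro h x hx
    have : listA.countP (fun x => decide (place * 10 ≤ x)) = 0 := by exact_mod_cast h
    rw [List.countP_eq_zero] at this
    have := this x hx
    simp at this ⊢; omega
  · intro h
    have : listA.countP (fun x => decide (place * 10 ≤ x)) = 0 := by
      rw [List.countP_eq_zero]
      intro x hx
      have := h x hx
      simp at this ⊢; omega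
    exact_mod_cast this

-- the two fueled loops agree for every fuel and every place
theorem loops_eq (fuel : Nat) :
    ∀ (listA : List Int) (place : Int),
      pvRadixA fuel listA place = pvLoopB fuel listA place := by
  induction fuel with
  | zero => intro listA place; rfl
  | succ fuel ih =>
    intro listA place
    simp only [pvRadixA, pvLoopB]
    by_cases h : (pvDistribA listA place).1 = 0
    · rw [if_pos h, if_pos ((stop_eq listA place).mp h), pvRound_eq listA place]
    · rw [if_neg h, if_neg (by
        intro hc
        exact h ((stop_eq listA place).mpr hc)),
        pvRound_eq listA place]
      exact ih _ _

-- ===== VERDICT (by name: the statement is the Claim_ definition above) =====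
theorem radix_helper_py_spec : Claim_equal_radix_helper_py := by
  intro listA place _ _
  unfold Spec_radix_helper_py radix_helper_py radix_helper_py_alt
  exact loops_eq 64 listA place
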